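-- pv_equiv track=rewrite | github.com/nbeesetti/grad-gpt | deadlines_agent.py | filter_chunks
-- ===== SOURCE A (Python) =====
-- def filter_chunks(chunks, selected_tags, limit=8):
--     if not selected_tags:
--         return chunks[:limit]
--
--     selected_lower = [t.lower() for t in selected_tags]
--     scored = []
--
--     for chunk in chunks:
--         chunk_tags = [t.lower() for t in chunk.get("tags", [])]
--         score = sum(1 for t in selected_lower if t in chunk_tags)
--         if score > 0:
--             scored.append((score, chunk))
--
--     scored.sort(key=lambda x: x[0], reverse=True)
--     return [chunk for _, chunk in scored[:limit]]
-- ===== SOURCE B (Python) =====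
-- def filter_chunks(chunks, selected_tags, limit=8):
--     if not selected_tags:
--         return chunks[:limit]
--
--     selected_lower = [t.lower() for t in selected_tags]
--     n = len(selected_lower)
--     buckets = [[] for _ in range(n + 1)]
--
--     for chunk in chunks:
--         chunk_tags = [t.lower() for t in chunk.get("tags", [])]
--         score = sum(1 for t in selected_lower if t in chunk_tags)
--         if score > 0:
--             buckets[score].append(chunk)
--
--     ordered = []
--     for bucket in reversed(buckets[1:]):
--         ordered.extend(bucket)
--     return ordered[:limit]
-- ===== Notes on version B (the rewrite author's own statement) =====
-- stated objective: alternative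
-- what changed: B replaces A's collect-tuples-then-stable-reverse-sort by bucketing positive-scoring chunks into score-indexed buckets (scores are bounded by len(selected_tags)) and emitting buckets from the highest score down, which reproduces the stable reverse-sort order without sorting.
import Mathlib
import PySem

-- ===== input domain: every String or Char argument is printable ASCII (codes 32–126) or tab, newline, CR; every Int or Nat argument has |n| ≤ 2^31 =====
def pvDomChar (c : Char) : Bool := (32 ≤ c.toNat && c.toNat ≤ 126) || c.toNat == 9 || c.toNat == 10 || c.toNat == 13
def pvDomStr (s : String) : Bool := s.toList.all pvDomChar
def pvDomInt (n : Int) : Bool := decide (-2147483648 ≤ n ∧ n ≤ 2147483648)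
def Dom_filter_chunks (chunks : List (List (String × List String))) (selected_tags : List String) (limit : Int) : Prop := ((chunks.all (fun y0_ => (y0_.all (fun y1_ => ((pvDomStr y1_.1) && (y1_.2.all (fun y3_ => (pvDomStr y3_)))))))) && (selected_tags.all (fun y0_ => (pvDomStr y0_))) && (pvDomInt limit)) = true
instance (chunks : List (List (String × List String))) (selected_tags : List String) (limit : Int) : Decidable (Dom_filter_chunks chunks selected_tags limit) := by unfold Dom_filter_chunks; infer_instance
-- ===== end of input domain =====

-- B replaces A's collect-and-sort (stable reverse sort by score, then slice) by bucketing positive-scoring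
-- chunks into score-indexed buckets and emitting them from the highest score down (objective: alternative).

-- ===== PORT A =====
def filter_chunks (chunks : List (List (String × List String))) (selected_tags : List String) (limit : Int) : List (List (String × List String)) :=
  if selected_tags = [] then
    PySem.List.slice chunks none (some limit)
  else
    let selected_lower := selected_tags.map PySem.Str.lower
    let scored := chunks.foldl (fun acc chunk =>
      let chunk_tags := (PySem.Dict.getD (PySem.Dict.mk chunk) "tags" []).map PySem.Str.lower
      let score : Int := ((selected_lower.filter (fun t => chunk_tags.contains t)).map (fun _ => (1 : Int))).sum
      if score > 0 then acc ++ [(score, chunk)] else acc) []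
    (PySem.List.slice (PySem.List.sorted scored (fun x => x.1) true) none (some limit)).map (fun x => x.2)

-- ===== PORT B =====
def filter_chunks_alt (chunks : List (List (String × List String))) (selected_tags : List String) (limit : Int) : List (List (String × List String)) :=
  if selected_tags = [] then
    PySem.List.slice chunks none (some limit)
  else
    let selected_lower := selected_tags.map PySem.Str.lower
    let n := selected_lower.length
    let buckets0 := (List.range (n + 1)).map (fun _ => ([] : List (List (String × List String))))
    let buckets := chunks.foldl (fun bs chunk =>
      let chunk_tags := (PySem.Dict.getD (PySem.Dict.mk chunk) "tags" []).map PySem.Str.lower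
      let score : Int := ((selected_lower.filter (fun t => chunk_tags.contains t)).map (fun _ => (1 : Int))).sum
      if score > 0 then bs.set score.toNat (bs.getD score.toNat [] ++ [chunk]) else bs) buckets0
    let ordered := ((PySem.List.slice buckets (some 1) none).reverse).foldl (fun acc b => acc ++ b) []
    PySem.List.slice ordered none (some limit)

-- ===== PRECONDITION & SPEC =====
def Spec_filter_chunks (chunks : List (List (String × List String))) (selected_tags : List String) (limit : Int) (out : List (List (String × List String))) : Prop := out = filter_chunks_alt chunks selected_tags limit
instance (chunks : List (List (String × List String))) (selected_tags : List String) (limit : Int) (out : List (List (String × List String))) : Decidable (Spec_filter_chunks chunks selected_tags limit out) := by unfold Spec_filter_chunks; infer_instance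

-- ===== CLAIM (what is proved, stated in full; the proofs are below) =====
def Claim_equal_filter_chunks : Prop := ∀ (chunks : List (List (String × List String))) (selected_tags : List String) (limit : Int), Dom_filter_chunks chunks selected_tags limit → Spec_filter_chunks chunks selected_tags limit (filter_chunks chunks selected_tags limit)

-- ===== LEMMAS AND PROOFS =====

-- the common per-chunk score, named for the proofs
def pvScore (sl : List String) (chunk : List (String × List String)) : Int :=
  ((sl.filter (fun t => ((PySem.Dict.getD (PySem.Dict.mk chunk) "tags" []).map PySem.Str.lower).contains t)).map (fun _ => (1 : Int))).sum

def pvF (l : List (Int × List (String × List String))) (s : Int) : List (Int × List (String × List String)) :=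
  l.filter (fun p => p.1 == s)

-- bucket concatenation, highest score first
def pvGcat : Nat → List (Int × List (String × List String)) → List (Int × List (String × List String))
  | 0, _ => []
  | s + 1, l => pvF l ((s : Int) + 1) ++ pvGcat s l

theorem pvScore_nonneg (sl : List String) (c : List (String × List String)) : 0 ≤ pvScore sl c := by
  unfold pvScore
  rw [PySem.List.sum_map_const_int]
  positivity

theorem pvScore_le (sl : List String) (c : List (String × List String)) : pvScore sl c ≤ (sl.length : Int) := by
  unfold pvScore
  rw [PySem.List.sum_map_const_int]
  simp only [mul_one, Nat.cast_le]
  exact List.length_filter_le _ _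

theorem pvInsertBy_append_left {α : Type} (before : α → α → Bool) (x : α) (ys zs : List α)
    (h : ∀ y ∈ ys, before x y = false) :
    PySem.List.insertBy before x (ys ++ zs) = ys ++ PySem.List.insertBy before x zs := by
  induction ys with
  | nil => simp
  | cons y ys ih =>
      have hy : before x y = false := h y (by simp)
      simp [PySem.List.insertBy, hy, ih (fun y hy' => h y (by simp [hy']))]

theorem pvInsertBy_all_true {α : Type} (before : α → α → Bool) (x : α) (zs : List α)
    (h : ∀ y ∈ zs, before x y = true) :
    PySem.List.insertBy before x zs = x :: zs := by
  cases zs with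
  | nil => simp [PySem.List.insertBy]
  | cons z zs => simp [PySem.List.insertBy, h z (by simp)]

theorem pvF_append (l m : List (Int × List (String × List String))) (s : Int) :
    pvF (l ++ m) s = pvF l s ++ pvF m s := by
  simp [pvF]

theorem pvGcat_append_irrel (n : Nat) (l : List (Int × List (String × List String)))
    (x : Int × List (String × List String)) (hx : (n : Int) < x.1) :
    pvGcat n (l ++ [x]) = pvGcat n l := by
  induction n with
  | zero => simp [pvGcat]
  | succ s ih =>
      have hs : ((s : Int) + 1) < x.1 := by push_cast at hx ⊢; omega
      have hxne : ¬ (x.1 == ((s : Int) + 1)) := by simp; omega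
      simp only [pvGcat, pvF_append]
      rw [ih (by push_cast at hx ⊢; omega)]
      simp [pvF, hxne]

theorem pvGcat_mem_key {n : Nat} {l : List (Int × List (String × List String))}
    {p : Int × List (String × List String)} (hp : p ∈ pvGcat n l) : 1 ≤ p.1 ∧ p.1 ≤ (n : Int) := by
  induction n with
  | zero => simp [pvGcat] at hp
  | succ s ih =>
      simp only [pvGcat, List.mem_append] at hp
      rcases hp with hp | hp
      · simp [pvF, List.mem_filter] at hp
        push_cast
        omega
      · have := ih hp
        push_cast at this ⊢
        omega

theorem pvGcat_insert (n : Nat) (l : List (Int × List (String × List String)))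
    (x : Int × List (String × List String)) (h1 : 1 ≤ x.1) (h2 : x.1 ≤ (n : Int)) :
    PySem.List.insertBy (fun a b => decide (b.1 < a.1)) x (pvGcat n l) = pvGcat n (l ++ [x]) := by
  induction n with
  | zero => simp at h2; omega
  | succ s ih =>
      simp only [pvGcat]
      rw [pvInsertBy_append_left]
      · by_cases hcase : x.1 = (s : Int) + 1
        · rw [pvInsertBy_all_true]
          · rw [pvGcat_append_irrel s l x (by omega)]
            simp [pvF, hcase]
          · intro y hy
            have := pvGcat_mem_key hy
            simp
            omega
        · have hle : x.1 ≤ (s : Int) := by push_cast at h2; omega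
          rw [ih hle]
          have hxne : ¬ (x.1 == ((s : Int) + 1)) := by simp; omega
          simp [pvF, hxne]
      · intro y hyy
        simp only [pvF, List.mem_filter] at hyy
        have : y.1 = (s : Int) + 1 := by simpa using hyy.2
        simp [this]
        push_cast at h2
        omega

theorem pvGcat_nil (n : Nat) : pvGcat n [] = [] := by
  induction n with
  | zero => rfl
  | succ s ih => simp [pvGcat, pvF, ih]

theorem pvFoldl_insert (n : Nat) (l m : List (Int × List (String × List String)))
    (h : ∀ p ∈ l, 1 ≤ p.1 ∧ p.1 ≤ (n : Int)) :
    l.foldl (fun acc x => PySem.List.insertBy (fun a b => decide (b.1 < a.1)) x acc) (pvGcat n m)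
      = pvGcat n (m ++ l) := by
  induction l generalizing m with
  | nil => simp
  | cons x xs ih =>
      simp only [List.foldl_cons]
      rw [pvGcat_insert n m x (h x (by simp)).1 (h x (by simp)).2,
          ih (m ++ [x]) (fun p hp => h p (by simp [hp]))]
      simp

theorem pvSorted_eq_gcat (n : Nat) (l : List (Int × List (String × List String)))
    (h : ∀ p ∈ l, 1 ≤ p.1 ∧ p.1 ≤ (n : Int)) :
    PySem.List.sorted l (fun x => x.1) true = pvGcat n l := by
  rw [PySem.List.sorted_rev_eq_foldl_insertBy]
  have := pvFoldl_insert n l [] h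
  rw [pvGcat_nil] at this
  simpa using this

theorem pvSet_map_range {β : Type} (g : Nat → β) (m k : Nat) (v : β) (_hk : k < m) :
    ((List.range m).map g).set k v = (List.range m).map (fun i => if i = k then v else g i) := by
  apply List.ext_getElem
  · simp
  · intro i h1 h2
    simp only [List.getElem_set, List.getElem_map, List.getElem_range]
    by_cases h : k = i
    · simp [h]
    · rw [if_neg h, if_neg (fun hh => h hh.symm)]

theorem pvSlice_map {α β : Type} (f : α → β) (xs : List α) (a? b? : Option Int) :
    PySem.List.slice (xs.map f) a? b? = (PySem.List.slice xs a? b?).map f := by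
  simp [PySem.List.slice, List.map_take, List.map_drop]

-- B's bucket list after processing, as a function of A's scored list
theorem pvBuckets_step (n : Nat) (sl : List String) (hn : n = sl.length)
    (l : List (Int × List (String × List String))) (chunk : List (String × List String)) :
    (if pvScore sl chunk > 0 then
        (((List.range (n + 1)).map (fun s : Nat => (pvF l (s : Int)).map Prod.snd)).set (pvScore sl chunk).toNat
          ((((List.range (n + 1)).map (fun s : Nat => (pvF l (s : Int)).map Prod.snd)).getD (pvScore sl chunk).toNat []) ++ [chunk]))
      else ((List.range (n + 1)).map (fun s : Nat => (pvF l (s : Int)).map Prod.snd)))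
    = (List.range (n + 1)).map (fun s : Nat =>
        (pvF (l ++ if pvScore sl chunk > 0 then [(pvScore sl chunk, chunk)] else []) (s : Int)).map Prod.snd) := by
  have h0 := pvScore_nonneg sl chunk
  have hle : pvScore sl chunk ≤ (n : Int) := hn ▸ pvScore_le sl chunk
  by_cases hpos : pvScore sl chunk > 0
  · simp only [hpos, if_true]
    have hkn : (pvScore sl chunk).toNat < n + 1 := by omega
    rw [PySem.List.getD_map_range _ _ _ _ hkn, pvSet_map_range _ _ _ _ hkn]
    apply List.map_congr_left
    intro i hi
    by_cases hik : i = (pvScore sl chunk).toNat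
    · subst hik
      have hcast : (((pvScore sl chunk).toNat : Nat) : Int) = pvScore sl chunk := by omega
      rw [if_pos rfl, hcast]
      simp [pvF]
    · have : ¬ (pvScore sl chunk == ((i : Nat) : Int)) := by simp; omega
      simp [hik, pvF, this]
  · simp [hpos]

theorem pvBuckets_fold (n : Nat) (sl : List String) (hn : n = sl.length)
    (chunks : List (List (String × List String))) (l : List (Int × List (String × List String))) :
    chunks.foldl (fun bs chunk =>
        if pvScore sl chunk > 0 then
          bs.set (pvScore sl chunk).toNat (bs.getD (pvScore sl chunk).toNat [] ++ [chunk])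
        else bs)
      ((List.range (n + 1)).map (fun s : Nat => (pvF l (s : Int)).map Prod.snd))
    = (List.range (n + 1)).map (fun s : Nat =>
        (pvF (l ++ (chunks.filter (fun c => decide (pvScore sl c > 0))).map (fun c => (pvScore sl c, c))) (s : Int)).map Prod.snd) := by
  induction chunks generalizing l with
  | nil => simp
  | cons c rest ih =>
      simp only [List.foldl_cons]
      rw [pvBuckets_step n sl hn l c, ih (l ++ if pvScore sl c > 0 then [(pvScore sl c, c)] else [])]
      by_cases hpos : pvScore sl c > 0 <;> simp [hpos]

theorem pvRevFlat (n : Nat) (l : List (Int × List (String × List String))) :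
    (((List.range n).map (fun i : Nat => (pvF l ((i : Int) + 1)).map Prod.snd)).reverse).flatten
      = (pvGcat n l).map Prod.snd := by
  induction n with
  | zero => simp [pvGcat]
  | succ s ih =>
      rw [List.range_succ]
      simp only [List.map_append, List.reverse_append, pvGcat, List.map_append]
      simp [ih]

theorem pvTail_buckets (n : Nat) (l : List (Int × List (String × List String))) :
    ((List.range (n + 1)).map (fun s : Nat => (pvF l (s : Int)).map Prod.snd)).tail
      = (List.range n).map (fun i : Nat => (pvF l ((i : Int) + 1)).map Prod.snd) := by
  rw [List.range_succ_eq_map]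
  simp only [List.map_cons, List.tail_cons, List.map_map]
  apply List.map_congr_left
  intro i _
  simp [Function.comp]

-- ===== VERDICT (by name: the statement is the Claim_ definition above) =====
theorem filter_chunks_spec : Claim_equal_filter_chunks := by
  intro chunks selected_tags limit _
  unfold Spec_filter_chunks filter_chunks filter_chunks_alt
  by_cases hsel : selected_tags = []
  · simp [hsel]
  · simp only [hsel, if_false]
    set sl := selected_tags.map PySem.Str.lower with hsl
    set n := sl.length with hn
    -- A's scored list in closed form
    have hA : chunks.foldl (fun acc chunk =>
        let chunk_tags := (PySem.Dict.getD (PySem.Dict.mk chunk) "tags" []).map PySem.Str.lower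
        let score : Int := ((sl.filter (fun t => chunk_tags.contains t)).map (fun _ => (1 : Int))).sum
        if score > 0 then acc ++ [(score, chunk)] else acc) []
        = (chunks.filter (fun c => decide (pvScore sl c > 0))).map (fun c => (pvScore sl c, c)) := by
      have := PySem.List.foldl_append_ite (fun c => pvScore sl c > 0) (fun c => (pvScore sl c, c)) chunks []
      simpa [pvScore] using this
    set scored := (chunks.filter (fun c => decide (pvScore sl c > 0))).map (fun c => (pvScore sl c, c)) with hscored
    have hkeys : ∀ p ∈ scored, 1 ≤ p.1 ∧ p.1 ≤ (n : Int) := by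
      intro p hp
      rw [hscored] at hp
      simp only [List.mem_map, List.mem_filter] at hp
      obtain ⟨c, ⟨_, hcpos⟩, rfl⟩ := hp
      have := pvScore_le sl c
      simp at hcpos
      exact ⟨by omega, by rw [hn]; exact this⟩
    -- B's buckets in closed form
    have hB : chunks.foldl (fun bs chunk =>
        let chunk_tags := (PySem.Dict.getD (PySem.Dict.mk chunk) "tags" []).map PySem.Str.lower
        let score : Int := ((sl.filter (fun t => chunk_tags.contains t)).map (fun _ => (1 : Int))).sum
        if score > 0 then bs.set score.toNat (bs.getD score.toNat [] ++ [chunk]) else bs)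
        ((List.range (n + 1)).map (fun _ => ([] : List (List (String × List String)))))
        = (List.range (n + 1)).map (fun s : Nat => (pvF scored (s : Int)).map Prod.snd) := by
      have h0 : (List.range (n + 1)).map (fun _ => ([] : List (List (String × List String))))
          = (List.range (n + 1)).map (fun s : Nat => (pvF ([] : List (Int × List (String × List String))) (s : Int)).map Prod.snd) := by
        simp [pvF]
      rw [h0]
      have := pvBuckets_fold n sl hn chunks []
      simp only [List.nil_append] at this
      rw [← this]
      apply PySem.List.foldl_congr_mem
      intro acc c _
      simp [pvScore]
    simp only [hA, hB]
    rw [PySem.List.slice_from_one, pvTail_buckets n scored,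
        PySem.List.foldl_append_eq_flatten, List.nil_append, pvRevFlat n scored,
        pvSorted_eq_gcat n scored hkeys, pvSlice_map]
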